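-- pv_equiv track=rewrite | github.com/LibreQoE/LibreQoS | src/integrationCommon.py | syntheticNetworkJsonId
-- ===== SOURCE A (Python) =====
-- def syntheticNetworkJsonId(scope: str, nodeType: str, name: str) -> str:
-- 	parts = []
-- 	for ch in str(name).lower():
-- 		if ch.isalnum():
-- 			parts.append(ch)
-- 		elif not parts or parts[-1] != '-':
-- 			parts.append('-')
-- 	slug = ''.join(parts).strip('-')
-- 	return f"libreqos:generated:{scope}:{nodeType}:{slug}"
-- ===== SOURCE B (Python) =====
-- from itertools import groupby
--
--
-- def syntheticNetworkJsonId(scope: str, nodeType: str, name: str) -> str: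
-- 	slug = '-'.join(
-- 		''.join(group)
-- 		for key, group in groupby(str(name).lower(), key=str.isalnum)
-- 		if key
-- 	)
-- 	return f"libreqos:generated:{scope}:{nodeType}:{slug}"
-- ===== Notes on version B (the rewrite author's own statement) =====
-- stated objective: idiomatic
-- what changed: Replaces the char-by-char state machine with dash deduplication and a final strip('-') by itertools.groupby tokenization: keep the maximal alphanumeric runs and join them with '-', which drops leading/trailing/repeated separators by construction.
import Mathlib
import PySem

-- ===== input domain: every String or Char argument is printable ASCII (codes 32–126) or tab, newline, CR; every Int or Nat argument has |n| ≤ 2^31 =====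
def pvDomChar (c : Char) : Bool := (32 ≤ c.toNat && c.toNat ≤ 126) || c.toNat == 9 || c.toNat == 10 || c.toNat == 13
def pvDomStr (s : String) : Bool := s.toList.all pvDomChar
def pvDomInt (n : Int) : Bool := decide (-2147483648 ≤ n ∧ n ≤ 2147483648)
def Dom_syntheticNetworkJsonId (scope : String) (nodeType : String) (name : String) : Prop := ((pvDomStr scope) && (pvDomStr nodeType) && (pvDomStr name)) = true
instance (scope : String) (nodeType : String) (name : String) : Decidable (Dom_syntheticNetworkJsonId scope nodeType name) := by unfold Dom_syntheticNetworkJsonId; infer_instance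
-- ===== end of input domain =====

-- B tokenizes with groupby instead of A's char-by-char state machine; idiomatic, same cost.

-- ===== PORT A =====
-- one loop iteration of A: append alnum chars, else append '-' unless parts already ends in '-'
def pvStepA (parts : List Char) (ch : Char) : List Char :=
  if PySem.Chars.isalnum ch then parts ++ [ch]
  else if parts = [] ∨ PySem.List.pyGet? parts (-1) ≠ some '-' then parts ++ ['-']
  else parts

def syntheticNetworkJsonId (scope : String) (nodeType : String) (name : String) : String :=
  let parts := (PySem.Str.lower name).toList.foldl pvStepA []
  let slug := PySem.Chars.stripChars parts ['-']
  String.ofList ("libreqos:generated:".toList ++ scope.toList ++ [':'] ++ nodeType.toList ++ [':'] ++ slug)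

-- ===== PORT B =====
-- itertools.groupby over the lowered string, key = isalnum: list of (key, maximal run)
def pvGroupsB (cs : List Char) : List (Bool × List Char) :=
  match cs with
  | [] => []
  | c :: rest =>
    let k := PySem.Chars.isalnum c
    (k, c :: rest.takeWhile (fun x => PySem.Chars.isalnum x == k)) ::
      pvGroupsB (rest.dropWhile (fun x => PySem.Chars.isalnum x == k))
termination_by cs.length
decreasing_by
  simp only [List.length_cons]
  exact Nat.lt_succ_of_le (List.length_dropWhile_le _ _)

-- the generator: keep the groups whose key is True
def pvTokensB (cs : List Char) : List (List Char) :=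
  (pvGroupsB cs).filterMap (fun g => if g.1 then some g.2 else none)

def syntheticNetworkJsonId_alt (scope : String) (nodeType : String) (name : String) : String :=
  let slug := PySem.Chars.join ['-'] (pvTokensB (PySem.Str.lower name).toList)
  String.ofList ("libreqos:generated:".toList ++ scope.toList ++ [':'] ++ nodeType.toList ++ [':'] ++ slug)

-- ===== PRECONDITION & SPEC =====
def Spec_syntheticNetworkJsonId (scope : String) (nodeType : String) (name : String) (out : String) : Prop := out = syntheticNetworkJsonId_alt scope nodeType name
instance (scope : String) (nodeType : String) (name : String) (out : String) : Decidable (Spec_syntheticNetworkJsonId scope nodeType name out) := by unfold Spec_syntheticNetworkJsonId; infer_instance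

-- ===== CLAIM (what is proved, stated in full; the proofs are below) =====
def Claim_equal_syntheticNetworkJsonId : Prop := ∀ (scope : String) (nodeType : String) (name : String), Dom_syntheticNetworkJsonId scope nodeType name → Spec_syntheticNetworkJsonId scope nodeType name (syntheticNetworkJsonId scope nodeType name)


-- ===== LEMMAS AND PROOFS =====

-- the state machine A runs, written as a recursion on the input
-- (lastDash = true: nothing emitted yet in this stretch may receive another '-')
def pvCore (lastDash : Bool) : List Char → List Char
  | [] => []
  | c :: cs =>
    if PySem.Chars.isalnum c then c :: pvCore false cs
    else if lastDash then pvCore true cs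
    else '-' :: pvCore true cs

theorem pvCore_cons_alnum {c : Char} (b : Bool) (cs : List Char)
    (hc : PySem.Chars.isalnum c = true) :
    pvCore b (c :: cs) = c :: pvCore false cs := by
  simp [pvCore, hc]

theorem pvCore_cons_non_true {c : Char} (cs : List Char)
    (hc : ¬ PySem.Chars.isalnum c = true) :
    pvCore true (c :: cs) = pvCore true cs := by
  simp [pvCore, hc]

theorem pvCore_cons_non_false {c : Char} (cs : List Char)
    (hc : ¬ PySem.Chars.isalnum c = true) :
    pvCore false (c :: cs) = '-' :: pvCore true cs := by
  simp [pvCore, hc]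

theorem pvGet_neg_one {l : List Char} (h : l ≠ []) :
    PySem.List.pyGet? l (-1) = l.getLast? := by
  have hl : 0 < l.length := List.length_pos_iff.mpr h
  simp only [PySem.List.pyGet?, PySem.List.pyIdx?]
  rw [if_neg (by omega), if_pos (by omega)]
  simp [List.getLast?_eq_getElem?]

theorem pvAlnum_ne_dash {c : Char} (h : PySem.Chars.isalnum c = true) : c ≠ '-' := by
  rintro rfl; exact absurd h (by decide)

-- A's fold tracked against pvCore, for both accumulator shapes
theorem pvFold_core (cs : List Char) : ∀ (acc : List Char),
    (acc.getLast? = some '-' → cs.foldl pvStepA acc = acc ++ pvCore true cs) ∧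
    (∀ a, acc.getLast? = some a → PySem.Chars.isalnum a = true →
      cs.foldl pvStepA acc = acc ++ pvCore false cs) := by
  induction cs with
  | nil => intro acc; simp [pvCore]
  | cons c cs ih =>
    intro acc
    have hne : ∀ (a : Char), acc.getLast? = some a → acc ≠ [] := by
      rintro a h rfl; simp at h
    constructor
    · intro hd
      have hacc : acc ≠ [] := hne _ hd
      simp only [List.foldl_cons]
      by_cases hc : PySem.Chars.isalnum c = true
      · rw [pvCore_cons_alnum _ _ hc]
        have hs : pvStepA acc c = acc ++ [c] := by simp [pvStepA, hc]
        rw [hs, (ih (acc ++ [c])).2 c (by simp) hc]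
        simp
      · rw [pvCore_cons_non_true _ hc]
        have hs : pvStepA acc c = acc := by
          simp only [pvStepA, if_neg hc]
          rw [if_neg]
          rintro (h | h)
          · exact hacc h
          · exact h (by rw [pvGet_neg_one hacc, hd])
        rw [hs, (ih acc).1 hd]
    · intro a hd ha
      have hacc : acc ≠ [] := hne _ hd
      simp only [List.foldl_cons]
      by_cases hc : PySem.Chars.isalnum c = true
      · rw [pvCore_cons_alnum _ _ hc]
        have hs : pvStepA acc c = acc ++ [c] := by simp [pvStepA, hc]
        rw [hs, (ih (acc ++ [c])).2 c (by simp) hc]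
        simp
      · rw [pvCore_cons_non_false _ hc]
        have hs : pvStepA acc c = acc ++ ['-'] := by
          simp only [pvStepA, if_neg hc]
          rw [if_pos]
          right
          rw [pvGet_neg_one hacc, hd]
          simp only [ne_eq, Option.some.injEq]
          exact pvAlnum_ne_dash ha
        rw [hs, (ih (acc ++ ['-'])).1 (by simp)]
        simp

theorem pvFold_nil (cs : List Char) : cs.foldl pvStepA [] = pvCore false cs := by
  cases cs with
  | nil => simp [pvCore]
  | cons c cs =>
    simp only [List.foldl_cons]
    by_cases hc : PySem.Chars.isalnum c = true
    · rw [pvCore_cons_alnum _ _ hc]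
      have hs : pvStepA [] c = [c] := by simp [pvStepA, hc]
      rw [hs, (pvFold_core cs [c]).2 c (by simp) hc]
      simp
    · rw [pvCore_cons_non_false _ hc]
      have hs : pvStepA [] c = ['-'] := by simp [pvStepA, hc]
      rw [hs, (pvFold_core cs ['-']).1 (by simp)]
      simp

-- pvCore true skips a run of non-alnum chars
theorem pvCore_non_run (u : List Char) (xs : List Char)
    (hu : ∀ x ∈ u, PySem.Chars.isalnum x = false) :
    pvCore true (u ++ xs) = pvCore true xs := by
  induction u with
  | nil => rfl
  | cons a u ih =>
    rw [List.cons_append, pvCore_cons_non_true _ (by simp [hu a (by simp)])]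
    exact ih (fun x hx => hu x (by simp [hx]))

-- pvCore emits a nonempty alnum run verbatim, from either state
theorem pvCore_alnum_run (u : List Char) : ∀ (xs : List Char) (b : Bool),
    (∀ x ∈ u, PySem.Chars.isalnum x = true) → u ≠ [] →
    pvCore b (u ++ xs) = u ++ pvCore false xs := by
  induction u with
  | nil => intro xs b _ h; exact absurd rfl h
  | cons a u ih =>
    intro xs b hu _
    rw [List.cons_append, pvCore_cons_alnum _ _ (hu a (by simp))]
    cases u with
    | nil => simp
    | cons a' u' =>
      rw [ih xs false (fun x hx => hu x (by simp [hx])) (by simp)]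
      simp

-- unfolding equation for B's token list
theorem pvTokensB_cons (c : Char) (rest : List Char) :
    pvTokensB (c :: rest) =
      if PySem.Chars.isalnum c then
        (c :: rest.takeWhile (fun x => PySem.Chars.isalnum x == PySem.Chars.isalnum c)) ::
          pvTokensB (rest.dropWhile (fun x => PySem.Chars.isalnum x == PySem.Chars.isalnum c))
      else pvTokensB (rest.dropWhile (fun x => PySem.Chars.isalnum x == PySem.Chars.isalnum c)) := by
  rw [pvTokensB, pvGroupsB]
  by_cases h : PySem.Chars.isalnum c = true <;> simp [h, pvTokensB]

-- whether the input ends in a non-alnum char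
def pvEndsNon (cs : List Char) : Bool :=
  match cs.getLast? with
  | some a => !PySem.Chars.isalnum a
  | none => false

theorem pvEndsNon_append (u : List Char) {d : List Char} (hd : d ≠ []) :
    pvEndsNon (u ++ d) = pvEndsNon d := by
  unfold pvEndsNon
  rw [List.getLast?_append_of_ne_nil _ hd]

theorem pvEndsNon_of_allNon {cs : List Char} (hne : cs ≠ [])
    (h : ∀ x ∈ cs, PySem.Chars.isalnum x = false) : pvEndsNon cs = true := by
  unfold pvEndsNon
  cases hgl : cs.getLast? with
  | none => exact absurd (List.getLast?_eq_none_iff.mp hgl) hne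
  | some a => simp [h a (List.mem_of_getLast? hgl)]

theorem pvEndsNon_of_allAl {cs : List Char}
    (h : ∀ x ∈ cs, PySem.Chars.isalnum x = true) : pvEndsNon cs = false := by
  unfold pvEndsNon
  cases hgl : cs.getLast? with
  | none => rfl
  | some a => simp [h a (List.mem_of_getLast? hgl)]

theorem pvDropWhile_head_false {p : Char → Bool} :
    ∀ (l : List Char) {d0 : Char} {d' : List Char},
      List.dropWhile p l = d0 :: d' → p d0 = false := by
  intro l
  induction l with
  | nil => intro d0 d' h; simp at h
  | cons a l ih =>
    intro d0 d' h
    rw [List.dropWhile_cons] at h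
    by_cases hp : p a = true
    · rw [if_pos hp] at h; exact ih h
    · rw [if_neg hp] at h
      injection h with h1 h2
      rw [← h1]
      exact Bool.eq_false_iff.mpr hp

-- every token of B is a nonempty all-alnum run
theorem pvTokens_alnum (cs : List Char) :
    ∀ t ∈ pvTokensB cs, t ≠ [] ∧ ∀ x ∈ t, PySem.Chars.isalnum x = true := by
  induction cs using pvGroupsB.induct with
  | case1 => intro t ht; simp [pvTokensB, pvGroupsB] at ht
  | case2 c rest k ih =>
    intro t ht
    rw [pvTokensB_cons] at ht
    by_cases hc : PySem.Chars.isalnum c = true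
    · rw [if_pos hc] at ht
      rcases List.mem_cons.mp ht with h | h
      · subst h
        refine ⟨by simp, ?_⟩
        intro x hx
        rcases List.mem_cons.mp hx with rfl | hx
        · exact hc
        · have := List.mem_takeWhile_imp hx
          simpa [hc] using this
      · exact ih t h
    · rw [if_neg hc] at ht
      exact ih t ht

-- no token means no alnum char at all
theorem pvTokens_nil (cs : List Char) :
    pvTokensB cs = [] → ∀ x ∈ cs, PySem.Chars.isalnum x = false := by
  induction cs using pvGroupsB.induct with
  | case1 => intro _ x hx; simp at hx
  | case2 c rest k ih =>
    intro h x hx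
    rw [pvTokensB_cons] at h
    by_cases hc : PySem.Chars.isalnum c = true
    · rw [if_pos hc] at h; simp at h
    · rw [if_neg hc] at h
      have hcf : PySem.Chars.isalnum c = false := Bool.eq_false_iff.mpr hc
      have hx' : x ∈ (c :: rest.takeWhile (fun x => PySem.Chars.isalnum x == PySem.Chars.isalnum c))
          ++ rest.dropWhile (fun x => PySem.Chars.isalnum x == PySem.Chars.isalnum c) := by
        rw [List.cons_append, List.takeWhile_append_dropWhile]
        exact hx
      rcases List.mem_append.mp hx' with h1 | h1
      · rcases List.mem_cons.mp h1 with rfl | h2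
        · exact hcf
        · have := List.mem_takeWhile_imp h2
          simpa [hcf] using this
      · exact ih h x h1

-- the heart: pvCore true is the dash-join of B's tokens, plus a possible trailing dash
theorem pvCore_join (cs : List Char) :
    pvCore true cs = PySem.Chars.join ['-'] (pvTokensB cs) ++
      (if pvTokensB cs ≠ [] ∧ pvEndsNon cs = true then ['-'] else []) := by
  induction cs using pvGroupsB.induct with
  | case1 => simp [pvCore, pvTokensB, pvGroupsB, PySem.Chars.join_nil]
  | case2 c rest k ih =>
    rw [pvTokensB_cons]
    have hsplit : c :: rest =
        (c :: rest.takeWhile (fun x => PySem.Chars.isalnum x == PySem.Chars.isalnum c))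
        ++ rest.dropWhile (fun x => PySem.Chars.isalnum x == PySem.Chars.isalnum c) := by
      rw [List.cons_append, List.takeWhile_append_dropWhile]
    by_cases hc : PySem.Chars.isalnum c = true
    · rw [if_pos hc]
      have htok : ∀ x ∈ c :: rest.takeWhile (fun x => PySem.Chars.isalnum x == PySem.Chars.isalnum c),
          PySem.Chars.isalnum x = true := by
        intro x hx
        rcases List.mem_cons.mp hx with rfl | hx
        · exact hc
        · have := List.mem_takeWhile_imp hx
          simpa [hc] using this
      rw [hsplit, pvCore_alnum_run _ _ _ htok (by simp)]
      cases hdre : rest.dropWhile (fun x => PySem.Chars.isalnum x == PySem.Chars.isalnum c) with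
      | nil =>
        rw [List.append_nil, pvEndsNon_of_allAl htok]
        simp [pvCore, pvTokensB, pvGroupsB, PySem.Chars.join_singleton]
      | cons d0 d' =>
        have hd0 : ¬ PySem.Chars.isalnum d0 = true := by
          have := pvDropWhile_head_false _ hdre
          simpa [hc] using this
        have hfalse : pvCore false (d0 :: d') = '-' :: pvCore true (d0 :: d') := by
          rw [pvCore_cons_non_false _ hd0, pvCore_cons_non_true _ hd0]
        have ih' : pvCore true (d0 :: d') = PySem.Chars.join ['-'] (pvTokensB (d0 :: d')) ++
            (if pvTokensB (d0 :: d') ≠ [] ∧ pvEndsNon (d0 :: d') = true then ['-'] else []) := by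
          have := ih; rw [hdre] at this; exact this
        rw [hfalse, ih',
          pvEndsNon_append (c :: rest.takeWhile (fun x => PySem.Chars.isalnum x == PySem.Chars.isalnum c)) (by simp)]
        cases htoksd : pvTokensB (d0 :: d') with
        | nil =>
          have hnon : ∀ x ∈ (d0 :: d'), PySem.Chars.isalnum x = false := pvTokens_nil _ htoksd
          rw [pvEndsNon_of_allNon (by simp) hnon]
          simp [PySem.Chars.join_singleton, PySem.Chars.join_nil]
        | cons q qs =>
          rw [PySem.Chars.join_cons_cons]
          rcases Bool.eq_false_or_eq_true (pvEndsNon (d0 :: d')) with h1 | h1 <;>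
            simp [h1]
    · rw [if_neg hc]
      have hcf : PySem.Chars.isalnum c = false := Bool.eq_false_iff.mpr hc
      have hnon : ∀ x ∈ c :: rest.takeWhile (fun x => PySem.Chars.isalnum x == PySem.Chars.isalnum c),
          PySem.Chars.isalnum x = false := by
        intro x hx
        rcases List.mem_cons.mp hx with rfl | hx
        · exact hcf
        · have := List.mem_takeWhile_imp hx
          simpa [hcf] using this
      rw [hsplit, pvCore_non_run _ _ hnon]
      cases hdre : rest.dropWhile (fun x => PySem.Chars.isalnum x == PySem.Chars.isalnum c) with
      | nil =>
        rw [hdre] at ih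
        rw [List.append_nil] at *
        rw [ih]
        simp [pvTokensB, pvGroupsB, PySem.Chars.join_nil]
      | cons d0 d' =>
        rw [hdre] at ih
        rw [ih, pvEndsNon_append _ (by simp)]

-- pvCore false is pvCore true, up to one leading dash
theorem pvCore_false_dash (cs : List Char) :
    pvCore false cs = pvCore true cs ∨ pvCore false cs = '-' :: pvCore true cs := by
  cases cs with
  | nil => left; rfl
  | cons c cs =>
    by_cases hc : PySem.Chars.isalnum c = true
    · left; rw [pvCore_cons_alnum _ _ hc, pvCore_cons_alnum _ _ hc]
    · right; rw [pvCore_cons_non_false _ hc, pvCore_cons_non_true _ hc]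

-- the first char pvCore true emits is alnum
theorem pvCore_true_head (cs : List Char) :
    ∀ h, (pvCore true cs).head? = some h → PySem.Chars.isalnum h = true := by
  induction cs with
  | nil => intro h hh; simp [pvCore] at hh
  | cons c cs ih =>
    intro h hh
    by_cases hc : PySem.Chars.isalnum c = true
    · rw [pvCore_cons_alnum _ _ hc] at hh
      simp at hh; rwa [← hh]
    · rw [pvCore_cons_non_true _ hc] at hh
      exact ih h hh

-- a dash-join of nonempty tokens is nonempty
theorem pvJoin_ne_nil (q : List Char) (qs : List (List Char)) (hq : q ≠ []) :
    PySem.Chars.join ['-'] (q :: qs) ≠ [] := by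
  cases qs with
  | nil => rwa [PySem.Chars.join_singleton]
  | cons q' qs' =>
    rw [PySem.Chars.join_cons_cons]
    cases q with
    | nil => exact absurd rfl hq
    | cons a as => simp

-- the last char of a dash-join of nonempty alnum tokens is alnum
theorem pvJoin_last (ts : List (List Char)) :
    (∀ t ∈ ts, t ≠ [] ∧ ∀ x ∈ t, PySem.Chars.isalnum x = true) →
    ∀ a, (PySem.Chars.join ['-'] ts).getLast? = some a → PySem.Chars.isalnum a = true := by
  induction ts with
  | nil => intro _ a ha; simp [PySem.Chars.join_nil] at ha
  | cons t ts ih =>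
    intro hts a ha
    cases ts with
    | nil =>
      rw [PySem.Chars.join_singleton] at ha
      exact (hts t (by simp)).2 a (List.mem_of_getLast? ha)
    | cons q qs =>
      rw [PySem.Chars.join_cons_cons, List.append_assoc,
        List.getLast?_append_of_ne_nil _
          (by
            have := pvJoin_ne_nil q qs (hts q (by simp)).1
            simp only [ne_eq, List.append_eq_nil_iff]
            rintro ⟨-, h⟩
            exact this h),
        List.getLast?_append_of_ne_nil _ (pvJoin_ne_nil q qs (hts q (by simp)).1)] at ha
      exact ih (fun t' ht' => hts t' (by simp [ht'])) a ha

theorem pvDropWhile_head {l : List Char} {pq : Char → Bool}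
    (h : ∀ a, l.head? = some a → pq a = false) : List.dropWhile pq l = l := by
  cases l with
  | nil => rfl
  | cons a l => rw [List.dropWhile_cons, if_neg (by simp [h a rfl])]

theorem pvStrip_eq (cs : List Char) :
    PySem.Chars.stripChars (pvCore false cs) ['-'] =
      PySem.Chars.join ['-'] (pvTokensB cs) := by
  have hdash : ∀ (x : Char), PySem.Chars.isalnum x = true → (['-'].contains x) = false := by
    intro x hx
    have hne := pvAlnum_ne_dash hx
    simp [hne]
  show (List.dropWhile (fun c => (['-'].contains c))
      (List.dropWhile (fun c => (['-'].contains c)) (pvCore false cs)).reverse).reverse =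
    PySem.Chars.join ['-'] (pvTokensB cs)
  have hstep1 : List.dropWhile (fun c => (['-'].contains c)) (pvCore false cs) =
      List.dropWhile (fun c => (['-'].contains c)) (pvCore true cs) := by
    rcases pvCore_false_dash cs with h | h
    · rw [h]
    · rw [h, List.dropWhile_cons, if_pos (by simp)]
  have hstep2 : List.dropWhile (fun c => (['-'].contains c)) (pvCore true cs) =
      pvCore true cs :=
    pvDropWhile_head (fun a ha => hdash a (pvCore_true_head cs a ha))
  rw [hstep1, hstep2, pvCore_join cs]
  cases hts : pvTokensB cs with
  | nil => simp [PySem.Chars.join_nil]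
  | cons q qs =>
    have halnum := pvTokens_alnum cs
    rw [hts] at halnum
    have hlast : ∀ a, (PySem.Chars.join ['-'] (q :: qs)).getLast? = some a →
        PySem.Chars.isalnum a = true := pvJoin_last (q :: qs) halnum
    have hdropRev : List.dropWhile (fun c => (['-'].contains c))
        (PySem.Chars.join ['-'] (q :: qs)).reverse =
        (PySem.Chars.join ['-'] (q :: qs)).reverse := by
      apply pvDropWhile_head
      intro a ha
      rw [List.head?_reverse] at ha
      exact hdash a (hlast a ha)
    by_cases hend : pvEndsNon cs = true
    · rw [if_pos ⟨by simp, hend⟩]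
      rw [List.reverse_append]
      have : (['-'] : List Char).reverse = ['-'] := rfl
      rw [this, List.cons_append, List.nil_append, List.dropWhile_cons,
        if_pos (by simp), hdropRev, List.reverse_reverse]
    · rw [if_neg (by simp [hend]), List.append_nil, hdropRev, List.reverse_reverse]

-- ===== VERDICT (by name: the statement is the Claim_ definition above) =====
theorem syntheticNetworkJsonId_spec : Claim_equal_syntheticNetworkJsonId := by
  intro scope nodeType name _
  show String.ofList ("libreqos:generated:".toList ++ scope.toList ++ [':'] ++ nodeType.toList ++ [':'] ++
      PySem.Chars.stripChars ((PySem.Str.lower name).toList.foldl pvStepA []) ['-']) =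
    String.ofList ("libreqos:generated:".toList ++ scope.toList ++ [':'] ++ nodeType.toList ++ [':'] ++
      PySem.Chars.join ['-'] (pvTokensB (PySem.Str.lower name).toList))
  rw [pvFold_nil, pvStrip_eq]
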